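-- pv_equiv track=rewrite | github.com/in03/todo-haiku | ml/scripts/train_char_lstm.py | get_syllable_boundaries_rule_based
-- ===== SOURCE A (Python) =====
-- def get_syllable_boundaries_rule_based(word):
--     """
--     Get syllable boundaries for a word using a rule-based approach.
--     Returns a list of BIO tags (B = beginning of syllable, I = inside, O = outside).
--     """
--     vowels = 'aeiouy'
--     bio_tags = ['I'] * len(word)
--
--     # First character of a vowel sequence is the beginning of a syllable
--     in_vowel = False
--     for i, char in enumerate(word.lower()):
--         if char in vowels:
--             if not in_vowel:
--                 bio_tags[i] = 'B'
--                 in_vowel = True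
--         else:
--             in_vowel = False
--
--     # If no syllable was found, mark the first character as the beginning
--     if 'B' not in bio_tags and len(bio_tags) > 0:
--         bio_tags[0] = 'B'
--
--     # Convert to numeric labels
--     # B = 2, I = 1, O = 0
--     numeric_labels = [2 if tag == 'B' else 1 if tag == 'I' else 0 for tag in bio_tags]
--
--     return numeric_labels
-- ===== SOURCE B (Python) =====
-- def get_syllable_boundaries_rule_based(word):
--     # Run-length decomposition: split the lowered word into maximal runs of
--     # vowels / non-vowels, emit [2,1,...] per vowel run and [1,...] per other run.
--     vowels = 'aeiouy'
--     lw = word.lower()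
--     n = len(lw)
--     labels = []
--     i = 0
--     while i < n:
--         v = lw[i] in vowels
--         j = i + 1
--         while j < n and (lw[j] in vowels) == v:
--             j += 1
--         labels.extend(([2] + [1] * (j - i - 1)) if v else [1] * (j - i))
--         i = j
--     if labels and 2 not in labels:
--         labels[0] = 2
--     return labels
-- ===== Notes on version B (the rewrite author's own statement) =====
-- stated objective: alternative
-- what changed: Replaces A's single character-by-character pass carrying an in_vowel flag over a pre-allocated tag array (plus a second numeric-conversion pass) with a run-length decomposition: an outer loop that splits the lowered word into maximal vowel/non-vowel runs and emits a whole numeric block ([2,1,...] or [1,...]) per run.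
import Mathlib
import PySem

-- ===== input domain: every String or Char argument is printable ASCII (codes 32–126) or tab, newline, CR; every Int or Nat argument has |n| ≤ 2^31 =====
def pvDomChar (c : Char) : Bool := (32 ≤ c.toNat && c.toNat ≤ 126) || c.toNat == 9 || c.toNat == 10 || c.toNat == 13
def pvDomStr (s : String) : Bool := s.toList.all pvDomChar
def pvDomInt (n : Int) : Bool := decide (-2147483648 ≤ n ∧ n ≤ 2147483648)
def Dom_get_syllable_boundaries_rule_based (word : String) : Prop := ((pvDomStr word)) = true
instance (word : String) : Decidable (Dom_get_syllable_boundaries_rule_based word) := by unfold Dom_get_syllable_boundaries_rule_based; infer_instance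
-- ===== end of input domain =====

-- B replaces A's per-character pass with its carried in_vowel flag and tag array by a
-- run-length decomposition (maximal vowel / non-vowel runs, one numeric block per run);
-- same return value, no speed claim.

-- ===== PORT A =====
-- literal transliteration of A: tag array of 'I's, enumerate loop carrying in_vowel,
-- no-vowel fallback, then conversion to numeric labels.
-- ('char in vowels' on a single character is exactly list membership in the vowel characters.)
def get_syllable_boundaries_rule_based (word : String) : List Int :=
  let vowels : List Char := "aeiouy".toList
  let bio_tags : List Char := List.replicate word.toList.length 'I'
  let st :=
    (PySem.List.enumerate ((PySem.Str.lower word).toList) 0).foldl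
      (fun (st : List Char × Bool) ic =>
        if ic.2 ∈ vowels then
          if st.2 = false then (PySem.List.pySetD st.1 ic.1 'B', true) else st
        else (st.1, false))
      (bio_tags, false)
  let tags := if 'B' ∉ st.1 ∧ 0 < st.1.length then PySem.List.pySetD st.1 0 'B' else st.1
  tags.map (fun t => if t = 'B' then 2 else if t = 'I' then 1 else 0)

-- ===== PORT B =====
-- B's outer while loop scans off one maximal run per iteration (index j in the Python,
-- takeWhile/dropWhile on the remaining suffix here) and appends one numeric block per run.
def pvIsV (c : Char) : Bool := c ∈ "aeiouy".toList

def pvRuns : List Char → List Int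
  | [] => []
  | c :: t =>
    let v := pvIsV c
    let run : List Char := c :: t.takeWhile (fun d => pvIsV d == v)
    let rest : List Char := t.dropWhile (fun d => pvIsV d == v)
    (if v then (2 : Int) :: List.replicate (run.length - 1) 1 else List.replicate run.length 1)
      ++ pvRuns rest
termination_by cs => cs.length
decreasing_by
  exact Nat.lt_succ_of_le (t.length_dropWhile_le _)

def get_syllable_boundaries_rule_based_alt (word : String) : List Int :=
  let lw : List Char := (PySem.Str.lower word).toList
  let labels : List Int := pvRuns lw
  if labels ≠ [] ∧ (2 : Int) ∉ labels then PySem.List.pySetD labels 0 2 else labels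

-- ===== PRECONDITION & SPEC =====
def Spec_get_syllable_boundaries_rule_based (word : String) (out : List Int) : Prop := out = get_syllable_boundaries_rule_based_alt word
instance (word : String) (out : List Int) : Decidable (Spec_get_syllable_boundaries_rule_based word out) := by unfold Spec_get_syllable_boundaries_rule_based; infer_instance

-- ===== CLAIM (what is proved, stated in full; the proofs are below) =====
def Claim_equal_get_syllable_boundaries_rule_based : Prop := ∀ (word : String), Dom_get_syllable_boundaries_rule_based word → Spec_get_syllable_boundaries_rule_based word (get_syllable_boundaries_rule_based word)

-- ===== LEMMAS AND PROOFS =====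

def pvVowels : List Char := "aeiouy".toList

-- the common syllable-tag sequence: tag of each char given whether the previous char was a vowel
def pvTagSpec (pv : Bool) : List Char → List Char
  | [] => []
  | c :: r => (if c ∈ pvVowels ∧ pv = false then 'B' else 'I') :: pvTagSpec (decide (c ∈ pvVowels)) r

def pvToNum (t : Char) : Int := if t = 'B' then 2 else if t = 'I' then 1 else 0

-- A's fold builds done ++ pvTagSpec pv cs (the final flag is irrelevant to the result)
lemma pvAloop (cs done : List Char) (pv : Bool) :
    ((PySem.List.enumerate cs (done.length : Int)).foldl
      (fun (st : List Char × Bool) ic =>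
        if ic.2 ∈ pvVowels then
          if st.2 = false then (PySem.List.pySetD st.1 ic.1 'B', true) else st
        else (st.1, false))
      (done ++ List.replicate cs.length 'I', pv)).1 = done ++ pvTagSpec pv cs := by
  induction cs generalizing done pv with
  | nil => simp [pvTagSpec, PySem.List.enumerate]
  | cons c r ih =>
    rw [PySem.List.enumerate_cons]
    simp only [List.foldl_cons, List.length_cons, List.replicate_succ]
    by_cases hv : c ∈ pvVowels
    · cases pv with
      | false =>
        simp only [hv, if_pos]
        have hset : PySem.List.pySetD (done ++ 'I' :: List.replicate r.length 'I')
            (done.length : Int) 'B' = (done ++ ['B']) ++ List.replicate r.length 'I' := by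
          rw [PySem.List.pySetD_natCast]
          rw [List.set_append_right _ _ (le_refl done.length)]
          simp
        rw [hset]
        have := ih (done ++ ['B']) true
        simp only [List.length_append, List.length_singleton] at this
        rw [show (done.length : Int) + 1 = ((done.length + 1 : Nat) : Int) by push_cast; ring]
        rw [this]
        simp [pvTagSpec, hv]
      | true =>
        simp only [hv, if_pos]
        rw [if_neg (by decide)]
        have hsplit : done ++ 'I' :: List.replicate r.length 'I'
            = (done ++ ['I']) ++ List.replicate r.length 'I' := by simp
        rw [hsplit]
        have := ih (done ++ ['I']) true
        simp only [List.length_append, List.length_singleton] at this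
        rw [show (done.length : Int) + 1 = ((done.length + 1 : Nat) : Int) by push_cast; ring]
        rw [this]
        simp [pvTagSpec, hv]
    · simp only [hv, if_false]
      have hsplit : done ++ 'I' :: List.replicate r.length 'I'
          = (done ++ ['I']) ++ List.replicate r.length 'I' := by simp
      rw [hsplit]
      have := ih (done ++ ['I']) false
      simp only [List.length_append, List.length_singleton] at this
      rw [show (done.length : Int) + 1 = ((done.length + 1 : Nat) : Int) by push_cast; ring]
      rw [this]
      simp [pvTagSpec, hv]

-- a maximal vowel run: 'B' on the head, 'I' on the rest, flag true afterwards
lemma pvTag_vowelRun (t rest : List Char) (h : ∀ d ∈ t, d ∈ pvVowels) :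
    pvTagSpec true (t ++ rest) = List.replicate t.length 'I' ++ pvTagSpec true rest := by
  induction t with
  | nil => simp
  | cons c r ih =>
    have hc : c ∈ pvVowels := h c (by simp)
    simp only [List.cons_append, pvTagSpec, hc, decide_true, List.length_cons,
      List.replicate_succ, List.cons_append]
    rw [ih (fun d hd => h d (by simp [hd]))]
    simp

-- a non-vowel run: all 'I', flag false afterwards (run nonempty)
lemma pvTag_consRun (c : Char) (t rest : List Char) (pv : Bool)
    (hc : c ∉ pvVowels) (h : ∀ d ∈ t, d ∉ pvVowels) :
    pvTagSpec pv (c :: t ++ rest) = List.replicate (t.length + 1) 'I' ++ pvTagSpec false rest := by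
  induction t generalizing c pv with
  | nil => simp [pvTagSpec, hc]
  | cons d r ih =>
    have hd : d ∉ pvVowels := h d (by simp)
    have hstep : pvTagSpec pv (c :: (d :: r) ++ rest)
        = 'I' :: pvTagSpec (decide (c ∈ pvVowels)) ((d :: r) ++ rest) := by
      simp [pvTagSpec, hc]
    rw [hstep, ih d (decide (c ∈ pvVowels)) hd (fun e he => h e (List.mem_cons_of_mem _ he))]
    simp [List.replicate_succ]

-- when the next char is not a vowel (or the list is empty), the incoming flag is irrelevant
lemma pvTag_flag_irrel (rest : List Char)
    (h : ∀ c t, rest = c :: t → c ∉ pvVowels) :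
    pvTagSpec true rest = pvTagSpec false rest := by
  cases rest with
  | nil => rfl
  | cons c t =>
    have hc := h c t rfl
    simp [pvTagSpec, hc]

lemma pvMap_replicate (n : Nat) :
    (List.replicate n 'I').map pvToNum = List.replicate n (1 : Int) := by
  simp [pvToNum]

-- B's run decomposition computes the numeric image of the tag sequence
lemma pvRuns_eq_aux (n : Nat) : ∀ (cs : List Char), cs.length ≤ n →
    pvRuns cs = (pvTagSpec false cs).map pvToNum := by
  induction n with
  | zero =>
    intro cs h
    have hnil : cs = [] := List.length_eq_zero_iff.mp (Nat.le_zero.mp h)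
    subst hnil; simp [pvRuns, pvTagSpec]
  | succ n ih =>
    intro cs hlen
    cases cs with
    | nil => simp [pvRuns, pvTagSpec]
    | cons c t =>
      rw [pvRuns]
      have htlen : t.length ≤ n := by simpa using Nat.lt_succ_iff.mp (by simpa using hlen)
      by_cases hv : pvIsV c
      · simp only [hv, if_pos]
        have hcV : c ∈ pvVowels := by simpa [pvIsV, pvVowels] using hv
        have ht : t = t.takeWhile (fun d => pvIsV d == true) ++ t.dropWhile (fun d => pvIsV d == true) :=
          (List.takeWhile_append_dropWhile).symm
        have ihrest := ih (t.dropWhile (fun d => pvIsV d == true))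
          (le_trans (t.length_dropWhile_le _) htlen)
        conv_rhs => rw [ht]
        rw [show pvTagSpec false (c :: (t.takeWhile (fun d => pvIsV d == true) ++ t.dropWhile (fun d => pvIsV d == true)))
            = (if c ∈ pvVowels ∧ false = false then 'B' else 'I')
              :: pvTagSpec (decide (c ∈ pvVowels)) (t.takeWhile (fun d => pvIsV d == true) ++ t.dropWhile (fun d => pvIsV d == true)) from rfl]
        rw [if_pos ⟨hcV, rfl⟩, show decide (c ∈ pvVowels) = true by simpa [pvIsV, pvVowels] using hv]
        rw [pvTag_vowelRun _ _ (fun d hd => by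
          have := List.mem_takeWhile_imp hd
          simpa [pvIsV, pvVowels] using this)]
        rw [pvTag_flag_irrel _ (fun c' t' hr => by
          have := List.head?_dropWhile_not (fun d => pvIsV d == true) t
          rw [hr] at this
          simp only [List.head?_cons] at this
          simpa [pvIsV, pvVowels] using this)]
        simp only [List.map_cons, List.map_append, pvMap_replicate, ihrest]
        simp [pvToNum]
      · have hvf : pvIsV c = false := by simpa using hv
        simp only [hvf, Bool.false_eq_true, if_false]
        have hcV : c ∉ pvVowels := by simpa [pvIsV, pvVowels] using hv
        have ht : t = t.takeWhile (fun d => pvIsV d == false) ++ t.dropWhile (fun d => pvIsV d == false) :=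
          (List.takeWhile_append_dropWhile).symm
        have ihrest := ih (t.dropWhile (fun d => pvIsV d == false))
          (le_trans (t.length_dropWhile_le _) htlen)
        conv_rhs => rw [ht]
        rw [show c :: (t.takeWhile (fun d => pvIsV d == false) ++ t.dropWhile (fun d => pvIsV d == false))
            = (c :: t.takeWhile (fun d => pvIsV d == false)) ++ t.dropWhile (fun d => pvIsV d == false) from rfl]
        rw [pvTag_consRun c _ _ false hcV (fun d hd => by
          have := List.mem_takeWhile_imp hd
          simpa [pvIsV, pvVowels] using this)]
        simp only [List.map_append, pvMap_replicate, ihrest]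
        simp

lemma pvRuns_eq (cs : List Char) : pvRuns cs = (pvTagSpec false cs).map pvToNum :=
  pvRuns_eq_aux cs.length cs (le_refl _)

-- every tag is 'B' or 'I'
lemma pvTag_mem (cs : List Char) (pv : Bool) :
    ∀ t ∈ pvTagSpec pv cs, t = 'B' ∨ t = 'I' := by
  induction cs generalizing pv with
  | nil => simp [pvTagSpec]
  | cons c r ih =>
    intro t ht
    simp only [pvTagSpec, List.mem_cons] at ht
    rcases ht with h | h
    · split at h <;> simp [h]
    · exact ih _ t h

-- 2 occurs in the numeric labels iff 'B' occurs in the tags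
lemma pvMem2 (cs : List Char) (pv : Bool) :
    (2 : Int) ∈ (pvTagSpec pv cs).map pvToNum ↔ 'B' ∈ pvTagSpec pv cs := by
  constructor
  · intro h
    rcases List.mem_map.mp h with ⟨t, ht, hnum⟩
    rcases pvTag_mem cs pv t ht with rfl | rfl
    · exact ht
    · simp [pvToNum] at hnum
  · intro h
    exact List.mem_map.mpr ⟨'B', h, by simp [pvToNum]⟩

-- ===== VERDICT (by name: the statement is the Claim_ definition above) =====
theorem get_syllable_boundaries_rule_based_spec : Claim_equal_get_syllable_boundaries_rule_based := by
  intro word _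
  unfold Spec_get_syllable_boundaries_rule_based
  unfold get_syllable_boundaries_rule_based get_syllable_boundaries_rule_based_alt
  simp only [show "aeiouy".toList = pvVowels from rfl,
    show (fun t => if t = 'B' then (2 : Int) else if t = 'I' then 1 else 0) = pvToNum from rfl]
  set cs : List Char := (PySem.Str.lower word).toList with hcs
  have hlen : word.toList.length = cs.length := by
    simp [hcs, PySem.Chars.lower]
  have hA := pvAloop cs [] false
  simp only [List.nil_append, List.length_nil, Nat.cast_zero] at hA
  rw [hlen, hA]
  rw [pvRuns_eq cs]
  set ts := pvTagSpec false cs with hts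
  by_cases hB : 'B' ∈ ts
  · rw [if_neg (by simp [hB]), if_neg (by simp [(pvMem2 cs false).mpr hB, hts])]
  · by_cases hn : 0 < ts.length
    · rw [if_pos ⟨hB, hn⟩]
      have hne : ts.map pvToNum ≠ [] := by
        simp only [ne_eq, List.map_eq_nil_iff]
        intro h; rw [h] at hn; simp at hn
      rw [if_pos ⟨hne, fun h => hB ((pvMem2 cs false).mp h)⟩]
      rw [PySem.List.pySetD_of_nonneg ts 'B' (by simp), PySem.List.pySetD_of_nonneg (ts.map pvToNum) 2 (by simp)]
      simp only [Int.toNat_zero]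
      cases ts with
      | nil => rfl
      | cons t r => simp [pvToNum]
    · rw [if_neg (fun h => hn h.2)]
      have hnil : ts = [] := List.length_eq_zero_iff.mp (by omega)
      rw [if_neg (by simp [hnil])]
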